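-- pv_equiv track=rewrite | github.com/everything-is-simple/Asteria | src/asteria/trade/coverage_repair_followup.py | build_earliest_day_map
-- ===== SOURCE A (Python) =====
-- def build_earliest_day_map(rows: list[dict[str, object]]) -> dict[str, str]:
--     mapped: dict[str, list[str]] = {
--         "portfolio_plan": [],
--         "trade": [],
--         "system_readout": [],
--     }
--     for row in rows:
--         layer = str(row["layer"])
--         observed_start = row["observed_start"]
--         if observed_start is None or layer not in mapped:
--             continue
--         mapped[layer].append(str(observed_start))
--     return {layer: min(values) if values else "none" for layer, values in mapped.items()}
-- ===== SOURCE B (Python) =====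
-- def build_earliest_day_map(rows: list[dict[str, object]]) -> dict[str, str]:
--     pp = tr = sr = None
--     for row in rows:
--         layer = str(row["layer"])
--         observed_start = row["observed_start"]
--         if observed_start is None:
--             continue
--         s = str(observed_start)
--         if layer == "portfolio_plan":
--             if pp is None or s < pp:
--                 pp = s
--         elif layer == "trade":
--             if tr is None or s < tr:
--                 tr = s
--         elif layer == "system_readout":
--             if sr is None or s < sr:
--                 sr = s
--     return {
--         "portfolio_plan": pp if pp is not None else "none",
--         "trade": tr if tr is not None else "none",
--         "system_readout": sr if sr is not None else "none",
--     }
-- ===== Notes on version B (the rewrite author's own statement) =====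
-- stated objective: simpler
-- what changed: A buckets every observed_start string into per-layer lists and then runs a separate min(list)-or-'none' reduction pass over the dict; B keeps one running-minimum scalar per layer and updates it in place during a single pass, so the per-layer lists and the second reduction pass disappear.
import Mathlib
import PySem

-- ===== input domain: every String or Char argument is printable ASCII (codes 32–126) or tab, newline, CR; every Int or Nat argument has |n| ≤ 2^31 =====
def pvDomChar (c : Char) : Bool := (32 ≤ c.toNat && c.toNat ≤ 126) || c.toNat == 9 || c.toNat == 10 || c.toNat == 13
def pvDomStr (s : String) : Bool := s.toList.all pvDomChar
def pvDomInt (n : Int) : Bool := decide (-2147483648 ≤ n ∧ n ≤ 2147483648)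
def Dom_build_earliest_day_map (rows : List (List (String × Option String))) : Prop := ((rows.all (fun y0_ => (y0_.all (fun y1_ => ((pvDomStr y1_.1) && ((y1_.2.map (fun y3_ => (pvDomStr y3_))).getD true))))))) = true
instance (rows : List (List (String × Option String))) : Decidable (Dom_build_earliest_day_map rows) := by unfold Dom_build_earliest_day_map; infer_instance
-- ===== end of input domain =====

-- B replaces A's collect-all-values-per-layer-then-min(list) reduction by a single pass keeping a
-- running minimum in three scalar accumulators (objective: simpler; equality of the RETURN value is what is proved).

-- ===== PORT A =====

-- str(v) for v : Option String (Python None prints as "None"); 'row[k]' = first-match lookup, total via getD under Pre_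
def pyStrOpt (v : Option String) : String := match v with | none => "None" | some s => s

-- A's loop body
def stepA (mapped : PySem.Dict String (List String)) (row : List (String × Option String)) : PySem.Dict String (List String) :=
  let layer := pyStrOpt ((row.lookup "layer").getD none)
  let observed_start := (row.lookup "observed_start").getD none
  match observed_start with
  | none => mapped
  | some s => if mapped.contains layer then mapped.modify layer [] (fun vs => vs ++ [s]) else mapped

def build_earliest_day_map (rows : List (List (String × Option String))) : List (String × String) :=
  let mapped : PySem.Dict String (List String) :=
    PySem.Dict.ofList [("portfolio_plan", []), ("trade", []), ("system_readout", [])]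
  let mapped := rows.foldl stepA mapped
  mapped.items.map (fun kv =>
    (kv.1, if kv.2.isEmpty then "none" else (PySem.List.min? kv.2 (fun x => x)).getD "none"))

-- ===== PORT B =====

-- running minimum: replace if unset or strictly smaller (Python 'if cur is None or s < cur')
def updMin (cur : Option String) (s : String) : Option String :=
  match cur with | none => some s | some m => if s < m then some s else some m

-- B's loop body over the three accumulators
def stepB (st : Option String × Option String × Option String) (row : List (String × Option String)) :
    Option String × Option String × Option String :=
  let layer := pyStrOpt ((row.lookup "layer").getD none)
  match (row.lookup "observed_start").getD none with
  | none => st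
  | some s =>
    if layer = "portfolio_plan" then (updMin st.1 s, st.2.1, st.2.2)
    else if layer = "trade" then (st.1, updMin st.2.1 s, st.2.2)
    else if layer = "system_readout" then (st.1, st.2.1, updMin st.2.2 s)
    else st

def build_earliest_day_map_alt (rows : List (List (String × Option String))) : List (String × String) :=
  let st := rows.foldl stepB (none, none, none)
  [("portfolio_plan", st.1.getD "none"), ("trade", st.2.1.getD "none"), ("system_readout", st.2.2.getD "none")]

-- ===== PRECONDITION & SPEC =====

-- Pre_ excludes exactly the rows missing a "layer" or "observed_start" key, on which Python A raises KeyError.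
def Pre_build_earliest_day_map (rows : List (List (String × Option String))) : Prop :=
  ∀ row ∈ rows, (row.lookup "layer").isSome ∧ (row.lookup "observed_start").isSome
instance (rows : List (List (String × Option String))) : Decidable (Pre_build_earliest_day_map rows) := by unfold Pre_build_earliest_day_map; infer_instance

def pvWitness_build_earliest_day_map : (List (List (String × Option String))) :=
  [[("layer", some "trade"), ("observed_start", some "2024-01-02")],
   [("layer", some "trade"), ("observed_start", some "2024-01-01")],
   [("layer", some "mystery"), ("observed_start", some "2023-01-01")],
   [("layer", some "portfolio_plan"), ("observed_start", none)]]

def Spec_build_earliest_day_map (rows : List (List (String × Option String))) (out : List (String × String)) : Prop := out = build_earliest_day_map_alt rows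
instance (rows : List (List (String × Option String))) (out : List (String × String)) : Decidable (Spec_build_earliest_day_map rows out) := by unfold Spec_build_earliest_day_map; infer_instance

-- ===== CLAIM (what is proved, stated in full; the proofs are below) =====
def Claim_equal_build_earliest_day_map : Prop := ∀ (rows : List (List (String × Option String))), Dom_build_earliest_day_map rows → Pre_build_earliest_day_map rows → Spec_build_earliest_day_map rows (build_earliest_day_map rows)

-- ===== LEMMAS AND PROOFS =====

-- the observed_start strings A appends to bucket k, in row order
def sel (k : String) (rows : List (List (String × Option String))) : List String :=
  rows.filterMap (fun row =>
    match (row.lookup "observed_start").getD none with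
    | none => none
    | some s => if pyStrOpt ((row.lookup "layer").getD none) = k then some s else none)

-- abbreviation for the dict state A's loop maintains
def mk3 (p t r : List String) : PySem.Dict String (List String) :=
  PySem.Dict.mk [("portfolio_plan", p), ("trade", t), ("system_readout", r)]

theorem updMin_some (m s : String) : updMin (some m) s = some (min m s) := by
  rcases lt_or_ge s m with h | h
  · simp [updMin, h, min_def, not_le.mpr h]
  · simp [updMin, not_lt.mpr h, min_def, h]

theorem foldl_updMin_some (l : List String) (a : String) :
    l.foldl updMin (some a) = some (l.foldl min a) := by
  induction l generalizing a with
  | nil => rfl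
  | cons x t ih => simp [List.foldl, updMin_some, ih]

theorem foldl_updMin_none (l : List String) :
    l.foldl updMin none = PySem.List.min? l (fun x => x) := by
  cases l with
  | nil => rfl
  | cons x t => simp [List.foldl, updMin, PySem.List.min?_id_cons, foldl_updMin_some]

theorem B_fold (rows : List (List (String × Option String))) (a b c : Option String) :
    rows.foldl stepB (a, b, c)
    = ((sel "portfolio_plan" rows).foldl updMin a,
       (sel "trade" rows).foldl updMin b,
       (sel "system_readout" rows).foldl updMin c) := by
  induction rows generalizing a b c with
  | nil => simp [sel]
  | cons row rest ih =>
    rw [List.foldl_cons]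
    cases h : (row.lookup "observed_start").getD none with
    | none =>
      have hs : stepB (a, b, c) row = (a, b, c) := by simp [stepB, h]
      rw [hs, ih]; simp [sel, List.filterMap, h]
    | some s =>
      by_cases h1 : pyStrOpt ((row.lookup "layer").getD none) = "portfolio_plan"
      · have hs : stepB (a, b, c) row = (updMin a s, b, c) := by simp [stepB, h, h1]
        rw [hs, ih]; simp [sel, List.filterMap, h, h1]
      · by_cases h2 : pyStrOpt ((row.lookup "layer").getD none) = "trade"
        · have hs : stepB (a, b, c) row = (a, updMin b s, c) := by simp [stepB, h, h1, h2]
          rw [hs, ih]; simp [sel, List.filterMap, h, h1, h2]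
        · by_cases h3 : pyStrOpt ((row.lookup "layer").getD none) = "system_readout"
          · have hs : stepB (a, b, c) row = (a, b, updMin c s) := by simp [stepB, h, h1, h2, h3]
            rw [hs, ih]; simp [sel, List.filterMap, h, h1, h2, h3]
          · have hs : stepB (a, b, c) row = (a, b, c) := by simp [stepB, h, h1, h2, h3]
            rw [hs, ih]; simp [sel, List.filterMap, h, h1, h2, h3]

theorem A_fold (rows : List (List (String × Option String))) (p t r : List String) :
    rows.foldl stepA (mk3 p t r)
    = mk3 (p ++ sel "portfolio_plan" rows) (t ++ sel "trade" rows) (r ++ sel "system_readout" rows) := by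
  induction rows generalizing p t r with
  | nil => simp [sel]
  | cons row rest ih =>
    rw [List.foldl_cons]
    cases h : (row.lookup "observed_start").getD none with
    | none =>
      have hs : stepA (mk3 p t r) row = mk3 p t r := by simp [stepA, h]
      rw [hs, ih]; simp [sel, List.filterMap, h]
    | some s =>
      by_cases h1 : pyStrOpt ((row.lookup "layer").getD none) = "portfolio_plan"
      · have hs : stepA (mk3 p t r) row = mk3 (p ++ [s]) t r := by
          simp [stepA, mk3, h, h1, PySem.Dict.contains, PySem.Dict.modify, PySem.Dict.insert,
                PySem.Dict.getD, PySem.Dict.get?, PySem.Dict.items]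
        rw [hs, ih]; simp [sel, mk3, List.filterMap, h, h1, List.append_assoc]
      · by_cases h2 : pyStrOpt ((row.lookup "layer").getD none) = "trade"
        · have hs : stepA (mk3 p t r) row = mk3 p (t ++ [s]) r := by
            simp [stepA, mk3, h, h1, h2, PySem.Dict.contains, PySem.Dict.modify, PySem.Dict.insert,
                  PySem.Dict.getD, PySem.Dict.get?, PySem.Dict.items]
          rw [hs, ih]; simp [sel, mk3, List.filterMap, h, h1, h2, List.append_assoc]
        · by_cases h3 : pyStrOpt ((row.lookup "layer").getD none) = "system_readout"
          · have hs : stepA (mk3 p t r) row = mk3 p t (r ++ [s]) := by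
              simp [stepA, mk3, h, h1, h2, h3, PySem.Dict.contains, PySem.Dict.modify, PySem.Dict.insert,
                    PySem.Dict.getD, PySem.Dict.get?, PySem.Dict.items]
            rw [hs, ih]; simp [sel, mk3, List.filterMap, h, h1, h2, h3, List.append_assoc]
          · have hcontains : (mk3 p t r).contains (pyStrOpt ((row.lookup "layer").getD none)) = false := by
              simp [mk3, PySem.Dict.contains]
              exact ⟨fun hc => absurd hc.symm h1, fun hc => absurd hc.symm h2, fun hc => absurd hc.symm h3⟩
            have hs : stepA (mk3 p t r) row = mk3 p t r := by
              simp [stepA, h, hcontains]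
            rw [hs, ih]; simp [sel, List.filterMap, h, h1, h2, h3]

theorem min_getD_eq (l : List String) :
    (if l = [] then "none" else (PySem.List.min? l (fun x => x)).getD "none")
      = (l.foldl updMin none).getD "none" := by
  rw [foldl_updMin_none]
  cases l with
  | nil => rfl
  | cons x t => simp

-- ===== VERDICT (by name: the statement is the Claim_ definition above) =====
theorem build_earliest_day_map_spec : Claim_equal_build_earliest_day_map := by
  intro rows _ _
  show build_earliest_day_map rows = build_earliest_day_map_alt rows
  simp only [build_earliest_day_map, build_earliest_day_map_alt]
  rw [show (PySem.Dict.ofList [("portfolio_plan", ([] : List String)), ("trade", []), ("system_readout", [])]) = mk3 [] [] [] from rfl]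
  rw [A_fold rows [] [] [], B_fold rows none none none]
  simp [mk3, PySem.Dict.items]
  exact ⟨min_getD_eq _, min_getD_eq _, min_getD_eq _⟩
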